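-- pv_equiv track=rewrite | github.com/dspina79/lp3thw | ex32/ex32-fibonacciseries.py | extend_level_1
-- ===== SOURCE A (Python) =====
-- def extend_level_1(series):
--     start = 0
--     num1 = series[start]
--     num2 = series[start + 1]
--     while start < len(series) - 1:
--         diff = num2 - num1
--         series.insert(start + 1, diff)
--         start += 2
--         try:
--             num1 = series[start]
--             num2 = series[start + 1]
--         except:
--             start = len(series)
--
--     return series
-- ===== SOURCE B (Python) =====
-- def extend_level_1(series):
--     # Single pass: interleave each consecutive difference between its two
--     # neighbours.  Mutates `series` in place (like A) and returns it.
--     out = []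
--     for prev, cur in zip(series, series[1:]):
--         out.append(prev)
--         out.append(cur - prev)
--     out.append(series[-1])
--     series[:] = out
--     return series
-- ===== Notes on version B (the rewrite author's own statement) =====
-- stated objective: faster
-- what changed: B builds the interleaved list in one pass over zipped consecutive pairs instead of repeatedly calling list.insert into the (growing) list with a moving index and a try/except cursor.
import Mathlib
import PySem

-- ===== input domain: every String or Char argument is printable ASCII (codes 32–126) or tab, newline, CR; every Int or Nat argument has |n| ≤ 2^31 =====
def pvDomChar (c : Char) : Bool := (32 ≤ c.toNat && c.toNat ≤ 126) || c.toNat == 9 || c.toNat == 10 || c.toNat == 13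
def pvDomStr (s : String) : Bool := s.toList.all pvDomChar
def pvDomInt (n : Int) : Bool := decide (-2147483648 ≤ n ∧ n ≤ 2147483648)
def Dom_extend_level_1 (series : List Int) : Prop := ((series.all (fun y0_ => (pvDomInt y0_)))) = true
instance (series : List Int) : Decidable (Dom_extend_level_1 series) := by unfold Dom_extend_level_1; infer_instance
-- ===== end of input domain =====

-- B replaces A's repeated list.insert with a moving cursor by a single pass over zipped
-- consecutive pairs; both Pythons mutate the argument in place, the equivalence proved
-- here is about the returned value.


-- ===== PORT A =====
-- the while loop: `start` stays a nonnegative Python int, modelled as Nat; the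
-- except branch sets start = len(series), after which the loop test fails.
def extend_level_1_loop (series : List Int) (start : Nat) (num1 num2 : Int) : List Int :=
  if start < series.length - 1 then
    let diff := num2 - num1
    let s' := PySem.List.insert series ((start : Int) + 1) diff
    let start' := start + 2
    match PySem.List.pyGet? s' (start' : Int), PySem.List.pyGet? s' ((start' : Int) + 1) with
    | some n1, some n2 => extend_level_1_loop s' start' n1 n2
    | _, _ => extend_level_1_loop s' s'.length num1 num2
  else series
termination_by series.length + 2 - start
decreasing_by
  all_goals simp only [PySem.List.length_insert]; omega

def extend_level_1 (series : List Int) : List Int :=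
  match PySem.List.pyGet? series 0, PySem.List.pyGet? series 1 with
  | some num1, some num2 => extend_level_1_loop series 0 num1 num2
  | _, _ => []  -- Python raises IndexError here; excluded by Pre_

-- ===== PORT B =====
def extend_level_1_alt (series : List Int) : List Int :=
  let out := (series.zip (PySem.List.slice series (some 1) none)).foldl
      (fun acc p => acc ++ [p.1, p.2 - p.1]) []
  match PySem.List.pyGet? series (-1) with
  | some last => out ++ [last]
  | none => []  -- the last-element lookup raises IndexError on an empty list; excluded by Pre_

-- ===== PRECONDITION & SPEC =====
-- A reads the first two elements before the loop: lists shorter than 2 raise IndexError.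
def Pre_extend_level_1 (series : List Int) : Prop := 2 ≤ series.length
instance (series : List Int) : Decidable (Pre_extend_level_1 series) := by
  unfold Pre_extend_level_1; infer_instance

def pvWitness_extend_level_1 : List Int := [1, 2, 3]

def Spec_extend_level_1 (series : List Int) (out : List Int) : Prop := out = extend_level_1_alt series
instance (series : List Int) (out : List Int) : Decidable (Spec_extend_level_1 series out) := by
  unfold Spec_extend_level_1; infer_instance

-- ===== CLAIM (what is proved, stated in full; the proofs are below) =====
def Claim_equal_extend_level_1 : Prop := ∀ (series : List Int), Dom_extend_level_1 series → Pre_extend_level_1 series → Spec_extend_level_1 series (extend_level_1 series)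
-- ===== LEMMAS AND PROOFS =====

-- the common mathematical shape of both results: x0, x1-x0, x1, x2-x1, x2, …
def interDiff (n1 : Int) : List Int → List Int
  | [] => [n1]
  | n2 :: r => n1 :: (n2 - n1) :: interDiff n2 r

theorem insert_prefix (P B : List Int) (v : Int) :
    PySem.List.insert (P ++ B) ((P.length : Int)) v = P ++ v :: B := by
  rw [PySem.List.insert_natCast (P ++ B) P.length v (by simp)]
  simp

theorem loopA_eq_interDiff (R : List Int) : ∀ (A : List Int) (num1 num2 : Int),
    extend_level_1_loop (A ++ num1 :: num2 :: R) A.length num1 num2 = A ++ interDiff num1 (num2 :: R) := by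
  induction R with
  | nil =>
    intro A num1 num2
    rw [extend_level_1_loop]
    have hcond : A.length < (A ++ num1 :: num2 :: []).length - 1 := by simp
    simp only [hcond, if_true]
    have hins : PySem.List.insert (A ++ num1 :: num2 :: []) (((A.length : Nat) : Int) + 1) (num2 - num1)
        = (A ++ [num1]) ++ (num2 - num1) :: num2 :: [] := by
      have h := insert_prefix (A ++ [num1]) (num2 :: []) (num2 - num1)
      simpa using h
    have h1 : PySem.List.pyGet? ((A ++ [num1]) ++ (num2 - num1) :: num2 :: []) (((A.length + 2 : Nat)) : Int)
        = some num2 := by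
      rw [PySem.List.pyGet?_natCast, List.getElem?_append_right (by simp)]
      simp
    have h2 : PySem.List.pyGet? ((A ++ [num1]) ++ (num2 - num1) :: num2 :: []) ((((A.length + 2 : Nat)) : Int) + 1)
        = (none : Option Int) := by
      have : (((A.length + 2 : Nat)) : Int) + 1 = ((A.length + 3 : Nat) : Int) := by push_cast; ring
      rw [this, PySem.List.pyGet?_natCast]
      simp
    rw [hins, h1, h2]
    have hstop : extend_level_1_loop ((A ++ [num1]) ++ (num2 - num1) :: num2 :: [])
        ((A ++ [num1]) ++ (num2 - num1) :: num2 :: []).length num1 num2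
        = (A ++ [num1]) ++ (num2 - num1) :: num2 :: [] := by
      rw [extend_level_1_loop, if_neg (by omega)]
    exact hstop.trans (by simp [interDiff])
  | cons r R' ih =>
    intro A num1 num2
    rw [extend_level_1_loop]
    have hcond : A.length < (A ++ num1 :: num2 :: r :: R').length - 1 := by simp
    simp only [hcond, if_true]
    have hins : PySem.List.insert (A ++ num1 :: num2 :: r :: R') (((A.length : Nat) : Int) + 1) (num2 - num1)
        = (A ++ [num1]) ++ (num2 - num1) :: num2 :: r :: R' := by
      have h := insert_prefix (A ++ [num1]) (num2 :: r :: R') (num2 - num1)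
      simpa using h
    have h1 : PySem.List.pyGet? ((A ++ [num1]) ++ (num2 - num1) :: num2 :: r :: R') (((A.length + 2 : Nat)) : Int)
        = some num2 := by
      rw [PySem.List.pyGet?_natCast, List.getElem?_append_right (by simp)]
      simp
    have h2 : PySem.List.pyGet? ((A ++ [num1]) ++ (num2 - num1) :: num2 :: r :: R') ((((A.length + 2 : Nat)) : Int) + 1)
        = some r := by
      have : (((A.length + 2 : Nat)) : Int) + 1 = ((A.length + 3 : Nat) : Int) := by push_cast; ring
      rw [this, PySem.List.pyGet?_natCast, List.getElem?_append_right (by simp)]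
      simp
    rw [hins, h1, h2]
    have hstep := ih (A ++ [num1, num2 - num1]) num2 r
    have hshape : (A ++ [num1]) ++ (num2 - num1) :: num2 :: r :: R'
        = (A ++ [num1, num2 - num1]) ++ num2 :: r :: R' := by simp
    have hlen : A.length + 2 = (A ++ [num1, num2 - num1]).length := by simp
    rw [hshape, hlen]
    exact hstep.trans (by simp [interDiff])

theorem foldB_eq_interDiff (xs : List Int) : ∀ (x : Int) (acc : List Int),
    (((x :: xs).zip xs).foldl (fun acc p => acc ++ [p.1, p.2 - p.1]) acc)
        ++ [(x :: xs).getLast (by simp)]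
      = acc ++ interDiff x xs := by
  induction xs with
  | nil => intro x acc; simp [interDiff]
  | cons y ys ih =>
    intro x acc
    simp only [List.zip_cons_cons, List.foldl_cons]
    rw [List.getLast_cons (by simp)]
    rw [ih y (acc ++ [x, y - x])]
    simp [interDiff]

-- ===== VERDICT (by name: the statement is the Claim_ definition above) =====
theorem extend_level_1_spec : Claim_equal_extend_level_1 := by
  intro series _ hpre
  unfold Pre_extend_level_1 at hpre
  match series, hpre with
  | x :: y :: R, _ =>
    show extend_level_1 (x :: y :: R) = extend_level_1_alt (x :: y :: R)
    have hA : extend_level_1 (x :: y :: R) = interDiff x (y :: R) := by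
      unfold extend_level_1
      have h0 : PySem.List.pyGet? (x :: y :: R) 0 = some x := by simp [pysem]
      have h1 : PySem.List.pyGet? (x :: y :: R) 1 = some y := by simp [pysem]
      rw [h0, h1]
      simpa using loopA_eq_interDiff R [] x y
    have hB : extend_level_1_alt (x :: y :: R) = interDiff x (y :: R) := by
      unfold extend_level_1_alt
      rw [PySem.List.slice_from_one]
      have hlast : PySem.List.pyGet? (x :: y :: R) (-1)
          = some ((x :: y :: R).getLast (by simp)) := by
        rw [PySem.List.pyGet?_neg_one, List.getLast?_eq_some_getLast]
      simp only [List.tail_cons, hlast]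
      exact foldB_eq_interDiff (y :: R) x []
    rw [hA, hB]
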